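-- pv_equiv track=rewrite | github.com/juanpemedina/dots-JP | config/Code - OSS/User/History/-302177ca/DR5g.py | validar_formato_entrada
-- ===== SOURCE A (Python) =====
-- def validar_formato_entrada(entrada):
--     # Eliminar espacios en blanco
--     entrada = entrada.replace(" ", "")
--
--     # Separar nombre del artículo y tamaños
--     nombre, tamaños = entrada.split(',', 1)
--
--     # Validar nombre del artículo
--     if not nombre.isalpha() or len(nombre) < 2 or len(nombre) > 15:
--         return False
--
--     # Validar tamaños
--     tamaños = tamaños.split(',')
--     if len(tamaños) > 5:
--         return False
--
--     prev_tamaño = 0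
--     for tamaño in tamaños:
--         tamaño = tamaño.strip()  # Eliminar espacios en blanco
--         if not tamaño.isdigit():
--             return False
--         tamaño = int(tamaño)
--         if tamaño < 1 or tamaño > 48 or tamaño <= prev_tamaño:
--             return False
--         prev_tamaño = tamaño
--
--     return True
-- ===== SOURCE B (Python) =====
-- def validar_formato_entrada(entrada):
--     entrada = entrada.replace(" ", "")
--     nombre, resto = entrada.split(',', 1)
--     if not (nombre.isalpha() and 2 <= len(nombre) <= 15):
--         return False
--     tokens = [t.strip() for t in resto.split(',')]
--     if len(tokens) > 5 or not all(t.isdigit() for t in tokens):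
--         return False
--     sizes = [int(t) for t in tokens]
--     return (all(1 <= s <= 48 for s in sizes)
--             and sizes == sorted(sizes)
--             and len(set(sizes)) == len(sizes))
-- ===== Notes on version B (the rewrite author's own statement) =====
-- stated objective: simpler
-- what changed: Replaces A's prev_tamano accumulator loop (digit test, range test and strict-increase test interleaved per token with early returns) by a staged declarative pipeline: strip all tokens, check all are digits, parse them all, then test the range and compare the list with its sorted copy and its set for the ascending-distinct condition.
import Mathlib
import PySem

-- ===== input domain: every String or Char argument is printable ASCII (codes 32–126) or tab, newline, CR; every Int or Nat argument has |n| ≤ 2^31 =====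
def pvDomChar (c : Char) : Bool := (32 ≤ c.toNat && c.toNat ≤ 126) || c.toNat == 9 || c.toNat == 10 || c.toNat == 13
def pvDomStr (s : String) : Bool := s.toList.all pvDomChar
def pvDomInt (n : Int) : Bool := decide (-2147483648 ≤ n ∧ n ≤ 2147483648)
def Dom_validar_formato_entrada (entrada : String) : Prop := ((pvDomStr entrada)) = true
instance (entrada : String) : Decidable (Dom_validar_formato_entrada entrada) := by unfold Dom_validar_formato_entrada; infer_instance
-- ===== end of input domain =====

-- B replaces A's prev_tamaño accumulator loop by a single staged pipeline (strip all tokens,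
-- check all digits, then compare the parsed list with its sorted copy and its set): objective 'simpler'.

-- ===== PORT A =====
def pvComma : List Char := [',']

def pvVal (t : List Char) : Int := (PySem.Int.ofChars? t).getD 0  -- int(t) on an isdigit-checked token

-- the 'for tamaño in tamaños' loop of A, with accumulator prev_tamaño
def pvALoop : List (List Char) → Int → Bool
  | [], _ => true
  | t :: ts, prev =>
    let t' := PySem.Chars.strip t
    if ¬ (PySem.Chars.strIsdigit t' = true) then false
    else
      let v := pvVal t'
      if v < 1 ∨ v > 48 ∨ v ≤ prev then false
      else pvALoop ts v

def validar_formato_entrada (entrada : String) : Bool :=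
  -- entrada = entrada.replace(" ", ""); nombre, tamaños = entrada.split(',', 1)
  match PySem.Chars.splitOnMax (PySem.Chars.replace entrada.toList [' '] []) pvComma 1 with
  | [nombre, tams] =>
    if ¬ (PySem.Chars.strIsalpha nombre = true) ∨ nombre.length < 2 ∨ nombre.length > 15 then false
    else
      if (PySem.Chars.splitOn tams pvComma).length > 5 then false
      else pvALoop (PySem.Chars.splitOn tams pvComma) 0
  | _ => false  -- no comma: Python raises ValueError here; excluded by Pre_

-- ===== PORT B =====
-- the tail of B after the name check: tokens (stripped), length/digit guard, then the declarative test
def pvBSizes (tokens : List (List Char)) : Bool :=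
  if tokens.length > 5 ∨ ¬ (tokens.all PySem.Chars.strIsdigit = true) then false
  else
    (tokens.map pvVal).all (fun s => decide (1 ≤ s ∧ s ≤ 48)) &&
    decide (tokens.map pvVal = PySem.List.sorted (tokens.map pvVal) (fun x => x) false) &&
    decide ((PySem.Set.ofList (tokens.map pvVal)).length = (tokens.map pvVal).length)

-- 'nombre, resto = entrada.split(",", 1)' ported by hand as a length-2 check plus head/getD
-- (exact: Python raises ValueError unless the split has exactly two pieces)
def validar_formato_entrada_alt (entrada : String) : Bool :=
  let parts := PySem.Chars.splitOnMax (PySem.Chars.replace entrada.toList [' '] []) pvComma 1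
  if parts.length = 2 then
    let nombre := parts.headD []
    let resto := parts.getD 1 []
    if ¬ (PySem.Chars.strIsalpha nombre = true ∧ 2 ≤ nombre.length ∧ nombre.length ≤ 15) then false
    else
      pvBSizes ((PySem.Chars.splitOn resto pvComma).map PySem.Chars.strip)
  else false  -- no comma: Python raises ValueError here; excluded by Pre_

-- ===== PRECONDITION & SPEC =====
-- Pre_ excludes exactly the inputs with no comma, on which A's tuple unpacking raises ValueError.
def Pre_validar_formato_entrada (entrada : String) : Prop := PySem.Str.isIn "," entrada = true
instance (entrada : String) : Decidable (Pre_validar_formato_entrada entrada) := by unfold Pre_validar_formato_entrada; infer_instance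
def pvWitness_validar_formato_entrada : String := "ab,1,2"

def Spec_validar_formato_entrada (entrada : String) (out : Bool) : Prop := out = validar_formato_entrada_alt entrada
instance (entrada : String) (out : Bool) : Decidable (Spec_validar_formato_entrada entrada out) := by unfold Spec_validar_formato_entrada; infer_instance

-- ===== CLAIM (what is proved, stated in full; the proofs are below) =====
def Claim_equal_validar_formato_entrada : Prop := ∀ (entrada : String), Dom_validar_formato_entrada entrada → Pre_validar_formato_entrada entrada → Spec_validar_formato_entrada entrada (validar_formato_entrada entrada)

-- ===== LEMMAS AND PROOFS =====

-- A's loop succeeds iff every (stripped) token is digits, the parsed values chain strictly up from prev, and all lie in 1..48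
lemma pvALoop_iff (ts : List (List Char)) (prev : Int) :
    pvALoop ts prev = true ↔
      ((∀ t ∈ ts, PySem.Chars.strIsdigit (PySem.Chars.strip t) = true) ∧
       List.IsChain (· < ·) (prev :: ts.map (fun t => pvVal (PySem.Chars.strip t))) ∧
       (∀ t ∈ ts, 1 ≤ pvVal (PySem.Chars.strip t) ∧ pvVal (PySem.Chars.strip t) ≤ 48)) := by
  induction ts generalizing prev with
  | nil => simp [pvALoop]
  | cons t ts ih =>
    simp only [pvALoop]
    by_cases hd : PySem.Chars.strIsdigit (PySem.Chars.strip t) = true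
    · rw [if_neg (by simpa using hd)]
      by_cases hv : pvVal (PySem.Chars.strip t) < 1 ∨ pvVal (PySem.Chars.strip t) > 48 ∨
          pvVal (PySem.Chars.strip t) ≤ prev
      · rw [if_pos hv]
        simp only [Bool.false_eq_true, false_iff]
        rintro ⟨-, hch, hr⟩
        rcases hr t (by simp) with ⟨h1, h2⟩
        have := (List.isChain_cons_cons.mp (by simpa using hch)).1
        omega
      · rw [if_neg hv, ih]
        push_neg at hv
        constructor
        · rintro ⟨hall, hch, hr⟩
          refine ⟨?_, ?_, ?_⟩
          · intro u hu; rcases List.mem_cons.mp hu with hu | hu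
            · simpa [hu] using hd
            · exact hall u hu
          · simp only [List.map_cons]
            exact List.isChain_cons_cons.mpr ⟨by omega, hch⟩
          · intro u hu; rcases List.mem_cons.mp hu with hu | hu
            · subst hu; omega
            · exact hr u hu
        · rintro ⟨hall, hch, hr⟩
          have hch' := List.isChain_cons_cons.mp (by simpa using hch)
          exact ⟨fun u hu => hall u (by simp [hu]), hch'.2, fun u hu => hr u (by simp [hu])⟩
    · rw [if_pos (by simpa using hd)]
      simp only [Bool.false_eq_true, false_iff]
      rintro ⟨hall, -, -⟩
      exact hd (hall t (by simp))

-- set(l) has as many elements as l iff l has no duplicates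
lemma pv_ofList_len_iff (l : List Int) : (PySem.Set.ofList l).length = l.length ↔ l.Nodup := by
  constructor
  · intro h
    induction l with
    | nil => simp
    | cons x xs ih =>
      rw [PySem.Set.ofList_cons] at h
      have hle1 : (PySem.Set.discard (PySem.Set.ofList xs) x).length ≤ (PySem.Set.ofList xs).length := by
        simp only [PySem.Set.discard]
        exact List.length_filter_le _ _
      have hle2 : (PySem.Set.ofList xs).length ≤ xs.length := PySem.Set.length_ofList_le xs
      simp only [List.length_cons] at h
      have hlen : (PySem.Set.ofList xs).length = xs.length := by omega
      have hfil : (PySem.Set.discard (PySem.Set.ofList xs) x).length = (PySem.Set.ofList xs).length := by omega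
      have hx : x ∉ xs := by
        intro hx
        have hxs : x ∈ PySem.Set.ofList xs := (PySem.Set.mem_ofList xs x).mpr hx
        have : ∀ a ∈ PySem.Set.ofList xs, (!(a == x)) = true := by
          simpa [PySem.Set.discard, List.length_filter_eq_length_iff] using hfil
        simpa using this x hxs
      exact List.nodup_cons.mpr ⟨hx, ih hlen⟩
  · intro h
    rw [PySem.Set.ofList_eq_self_of_nodup l h]

-- strict pairwise increase = "equals its sorted copy and has no duplicates" (B's declarative test)
lemma pv_sorted_nodup_iff (l : List Int) :
    (l = PySem.List.sorted l (fun x => x) false ∧ (PySem.Set.ofList l).length = l.length) ↔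
      l.Pairwise (· < ·) := by
  rw [pv_ofList_len_iff]
  constructor
  · rintro ⟨hs, hnd⟩
    have hle : l.Pairwise (fun a b => a ≤ b) := by
      have := PySem.List.sorted_pairwise l (fun x : Int => x)
      rwa [← hs] at this
    exact (hle.and hnd).imp (fun h => lt_of_le_of_ne h.1 h.2)
  · intro hp
    refine ⟨?_, hp.imp (fun h => ne_of_lt h)⟩
    exact (PySem.List.sorted_eq_of_perm_of_pairwise_lt l l (fun x => x) (List.Perm.refl l) hp).symm

-- A's guarded loop equals B's stripped-tokens pipeline, for any token list
lemma pv_tail (ts : List (List Char)) :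
    (if ts.length > 5 then false else pvALoop ts 0) = pvBSizes (ts.map PySem.Chars.strip) := by
  unfold pvBSizes
  rw [List.length_map]
  by_cases h5 : ts.length > 5
  · rw [if_pos h5, if_pos (Or.inl h5)]
  · rw [if_neg h5]
    by_cases hdig : ∀ t ∈ ts, PySem.Chars.strIsdigit (PySem.Chars.strip t) = true
    · rw [if_neg (by
        push_neg
        refine ⟨by omega, ?_⟩
        simp only [List.all_eq_true]
        intro t ht
        rcases List.mem_map.mp ht with ⟨u, hu, rfl⟩
        exact hdig u hu)]
      have hmap : (ts.map PySem.Chars.strip).map pvVal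
          = ts.map (fun t => pvVal (PySem.Chars.strip t)) := by
        rw [List.map_map]; rfl
      rw [Bool.eq_iff_iff, pvALoop_iff, hmap]
      set sizes := ts.map (fun t => pvVal (PySem.Chars.strip t)) with hsz
      simp only [Bool.and_eq_true, List.all_eq_true, decide_eq_true_eq]
      constructor
      · rintro ⟨-, hch, hr⟩
        have hr' : ∀ s ∈ sizes, 1 ≤ s ∧ s ≤ 48 := by
          intro s hs
          rcases List.mem_map.mp hs with ⟨t, ht, rfl⟩
          exact hr t ht
        have hp : sizes.Pairwise (· < ·) := by
          have := (List.isChain_iff_pairwise (R := (· < · : Int → Int → Prop))).mp hch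
          exact (List.pairwise_cons.mp this).2
        rcases (pv_sorted_nodup_iff sizes).mpr hp with ⟨h1, h2⟩
        exact ⟨⟨hr', h1⟩, h2⟩
      · rintro ⟨⟨hr', h1⟩, h2⟩
        have hp : sizes.Pairwise (· < ·) := (pv_sorted_nodup_iff sizes).mp ⟨h1, h2⟩
        refine ⟨hdig, ?_, ?_⟩
        · apply (List.isChain_iff_pairwise (R := (· < · : Int → Int → Prop))).mpr
          apply List.pairwise_cons.mpr
          refine ⟨?_, hp⟩
          intro s hs
          have := (hr' s hs).1
          omega
        · intro t ht
          exact hr' _ (List.mem_map.mpr ⟨t, ht, rfl⟩)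
    · -- some token is not all-digits: A's loop fails, B's guard fires
      rw [if_pos (by
        right
        push_neg at hdig
        rcases hdig with ⟨t, ht, hnt⟩
        simp only [List.all_eq_true, not_forall]
        exact ⟨PySem.Chars.strip t, List.mem_map.mpr ⟨t, ht, rfl⟩, hnt⟩)]
      rw [Bool.eq_iff_iff, pvALoop_iff]
      simp only [Bool.false_eq_true, iff_false]
      rintro ⟨hall, -, -⟩
      exact hdig hall

theorem pv_main (entrada : String) :
    validar_formato_entrada entrada = validar_formato_entrada_alt entrada := by
  unfold validar_formato_entrada validar_formato_entrada_alt
  cases hsplit : PySem.Chars.splitOnMax (PySem.Chars.replace entrada.toList [' '] []) pvComma 1 with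
  | nil => rfl
  | cons nombre rest =>
    cases rest with
    | nil => rfl
    | cons tams rest2 =>
      cases rest2 with
      | cons x t2 =>
        rw [if_neg (by intro h; simp only [List.length_cons] at h; omega)]
      | nil =>
        show (if ¬ PySem.Chars.strIsalpha nombre = true ∨ nombre.length < 2 ∨ nombre.length > 15 then false
              else if (PySem.Chars.splitOn tams pvComma).length > 5 then false
              else pvALoop (PySem.Chars.splitOn tams pvComma) 0)
            = (if ¬ (PySem.Chars.strIsalpha nombre = true ∧ 2 ≤ nombre.length ∧ nombre.length ≤ 15) then false
              else pvBSizes (List.map PySem.Chars.strip (PySem.Chars.splitOn tams pvComma)))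
        by_cases hname : PySem.Chars.strIsalpha nombre = true ∧ 2 ≤ nombre.length ∧ nombre.length ≤ 15
        · rw [if_neg (by push_neg; exact ⟨hname.1, by omega, by omega⟩), if_neg (not_not.mpr hname)]
          exact pv_tail (PySem.Chars.splitOn tams pvComma)
        · have hA : ¬ PySem.Chars.strIsalpha nombre = true ∨ nombre.length < 2 ∨ nombre.length > 15 := by
            by_cases h1 : PySem.Chars.strIsalpha nombre = true
            · by_cases h2 : 2 ≤ nombre.length
              · by_cases h3 : nombre.length ≤ 15
                · exact absurd ⟨h1, h2, h3⟩ hname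
                · right; right; omega
              · right; left; omega
            · left; exact h1
          rw [if_pos hA, if_pos hname]

-- ===== VERDICT (by name: the statement is the Claim_ definition above) =====
theorem validar_formato_entrada_spec : Claim_equal_validar_formato_entrada := by
  intro entrada _ _
  unfold Spec_validar_formato_entrada
  exact pv_main entrada
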